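-- pv_equiv track=rewrite | github.com/CGATOxford/UMI-tools | umi_tools/extract.py | extractSeqAndQuals
-- ===== SOURCE A (Python) =====
-- def extractSeqAndQuals(seq, quals, umi_bases, cell_bases, discard_bases):
--     '''Remove selected bases from seq and quals'''
--
--     new_seq = ""
--     new_quals = ""
--     umi_quals = ""
--     cell_quals = ""
--
--     ix = 0
--     for base, qual in zip(seq, quals):
--         if ((ix not in discard_bases) and
--             (ix not in cell_bases) and
--             (ix not in umi_bases)):
--             new_quals += qual
--             new_seq += base
--         elif ix in cell_bases:
--             cell_quals += qual
--         elif ix in umi_bases: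
--             umi_quals += qual
--
--         ix += 1
--
--     return new_seq, new_quals, umi_quals, cell_quals
-- ===== SOURCE B (Python) =====
-- def extractSeqAndQuals(seq, quals, umi_bases, cell_bases, discard_bases):
--     '''Remove selected bases from seq and quals'''
--     pairs = list(enumerate(zip(seq, quals)))
--     keep = lambda i: i not in discard_bases and i not in cell_bases and i not in umi_bases
--     new_seq = "".join(b for i, (b, q) in pairs if keep(i))
--     new_quals = "".join(q for i, (b, q) in pairs if keep(i))
--     umi_quals = "".join(q for i, (b, q) in pairs
--                         if i in umi_bases and i not in cell_bases)
--     cell_quals = "".join(q for i, (b, q) in pairs if i in cell_bases)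
--     return new_seq, new_quals, umi_quals, cell_quals
-- ===== Notes on version B (the rewrite author's own statement) =====
-- stated objective: idiomatic
-- what changed: Replaced the single multi-way classifying accumulation loop with four independent ''.join comprehensions over enumerate(zip(seq, quals)), one per output string, with the cell-over-umi priority expressed as an explicit filter condition.
import Mathlib
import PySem

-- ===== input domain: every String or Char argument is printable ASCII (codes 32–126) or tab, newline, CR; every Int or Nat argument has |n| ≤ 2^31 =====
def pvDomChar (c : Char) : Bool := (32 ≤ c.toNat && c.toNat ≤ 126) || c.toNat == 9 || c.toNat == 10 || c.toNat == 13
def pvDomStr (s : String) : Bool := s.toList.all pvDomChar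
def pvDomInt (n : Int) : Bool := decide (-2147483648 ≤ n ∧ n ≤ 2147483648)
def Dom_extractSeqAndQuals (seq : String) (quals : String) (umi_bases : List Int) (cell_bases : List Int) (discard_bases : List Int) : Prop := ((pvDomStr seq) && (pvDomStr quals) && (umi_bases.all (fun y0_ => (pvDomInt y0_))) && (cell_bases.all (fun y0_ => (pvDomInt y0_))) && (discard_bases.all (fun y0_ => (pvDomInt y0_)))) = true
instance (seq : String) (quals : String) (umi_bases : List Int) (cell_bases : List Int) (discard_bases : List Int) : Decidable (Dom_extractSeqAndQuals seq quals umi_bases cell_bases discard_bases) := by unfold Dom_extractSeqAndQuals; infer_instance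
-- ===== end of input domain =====

-- B replaces A's single multi-way accumulating loop with four independent filtered
-- comprehensions over the enumerated zip (objective: idiomatic; no speed claim).

-- ===== PORT A =====
-- A's loop body: classify position ix, extend the matching accumulator, bump ix.
def pvStepA (umi_bases cell_bases discard_bases : List Int)
    (st : String × String × String × String × Int) (p : Char × Char) :
    String × String × String × String × Int :=
  match st, p with
  | (new_seq, new_quals, umi_quals, cell_quals, ix), (base, qual) =>
    if ix ∉ discard_bases ∧ ix ∉ cell_bases ∧ ix ∉ umi_bases then
      (new_seq.push base, new_quals.push qual, umi_quals, cell_quals, ix + 1)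
    else if ix ∈ cell_bases then
      (new_seq, new_quals, umi_quals, cell_quals.push qual, ix + 1)
    else if ix ∈ umi_bases then
      (new_seq, new_quals, umi_quals.push qual, cell_quals, ix + 1)
    else
      (new_seq, new_quals, umi_quals, cell_quals, ix + 1)

def extractSeqAndQuals (seq : String) (quals : String) (umi_bases : List Int) (cell_bases : List Int) (discard_bases : List Int) : String × String × String × String :=
  let r := (seq.toList.zip quals.toList).foldl
      (pvStepA umi_bases cell_bases discard_bases) ("", "", "", "", 0)
  (r.1, r.2.1, r.2.2.1, r.2.2.2.1)

-- ===== PORT B =====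
-- "".join of a filtered comprehension over enumerate(zip(seq, quals)).
def extractSeqAndQuals_alt (seq : String) (quals : String) (umi_bases : List Int) (cell_bases : List Int) (discard_bases : List Int) : String × String × String × String :=
  let pairs := PySem.List.enumerate (seq.toList.zip quals.toList) 0
  let keep : Int → Bool := fun i => decide (i ∉ discard_bases ∧ i ∉ cell_bases ∧ i ∉ umi_bases)
  (String.ofList ((pairs.filter (fun p => keep p.1)).map (fun p => p.2.1)),
   String.ofList ((pairs.filter (fun p => keep p.1)).map (fun p => p.2.2)),
   String.ofList ((pairs.filter (fun p => decide (p.1 ∈ umi_bases ∧ p.1 ∉ cell_bases))).map (fun p => p.2.2)),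
   String.ofList ((pairs.filter (fun p => decide (p.1 ∈ cell_bases))).map (fun p => p.2.2)))

-- ===== PRECONDITION & SPEC =====
def Spec_extractSeqAndQuals (seq : String) (quals : String) (umi_bases : List Int) (cell_bases : List Int) (discard_bases : List Int) (out : String × String × String × String) : Prop := out = extractSeqAndQuals_alt seq quals umi_bases cell_bases discard_bases
instance (seq : String) (quals : String) (umi_bases : List Int) (cell_bases : List Int) (discard_bases : List Int) (out : String × String × String × String) : Decidable (Spec_extractSeqAndQuals seq quals umi_bases cell_bases discard_bases out) := by unfold Spec_extractSeqAndQuals; infer_instance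

-- ===== CLAIM (what is proved, stated in full; the proofs are below) =====
def Claim_equal_extractSeqAndQuals : Prop := ∀ (seq : String) (quals : String) (umi_bases : List Int) (cell_bases : List Int) (discard_bases : List Int), Dom_extractSeqAndQuals seq quals umi_bases cell_bases discard_bases → Spec_extractSeqAndQuals seq quals umi_bases cell_bases discard_bases (extractSeqAndQuals seq quals umi_bases cell_bases discard_bases)

-- ===== LEMMAS AND PROOFS =====

theorem pv_push_eq (l : List Char) (c : Char) :
    String.push (String.ofList l) c = String.ofList (l ++ [c]) := by
  apply String.toList_injective; simp

-- Loop invariant for A's fold: starting from accumulators ns/nq/uq/cq and index ix,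
-- the fold appends exactly B's four filtered selections over enumerate l ix.
theorem pv_loopA (umi_bases cell_bases discard_bases : List Int)
    (l : List (Char × Char)) (ns nq uq cq : List Char) (ix : Int) :
    l.foldl (pvStepA umi_bases cell_bases discard_bases)
      (String.ofList ns, String.ofList nq, String.ofList uq, String.ofList cq, ix) =
    (String.ofList (ns ++ ((PySem.List.enumerate l ix).filter
        (fun p => decide (p.1 ∉ discard_bases ∧ p.1 ∉ cell_bases ∧ p.1 ∉ umi_bases))).map (fun p => p.2.1)),
     String.ofList (nq ++ ((PySem.List.enumerate l ix).filter
        (fun p => decide (p.1 ∉ discard_bases ∧ p.1 ∉ cell_bases ∧ p.1 ∉ umi_bases))).map (fun p => p.2.2)),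
     String.ofList (uq ++ ((PySem.List.enumerate l ix).filter
        (fun p => decide (p.1 ∈ umi_bases ∧ p.1 ∉ cell_bases))).map (fun p => p.2.2)),
     String.ofList (cq ++ ((PySem.List.enumerate l ix).filter
        (fun p => decide (p.1 ∈ cell_bases))).map (fun p => p.2.2)),
     ix + l.length) := by
  induction l generalizing ns nq uq cq ix with
  | nil => simp [PySem.List.enumerate_nil]
  | cons hd tl ih =>
    obtain ⟨base, qual⟩ := hd
    rw [List.foldl_cons]
    by_cases hk : ix ∉ discard_bases ∧ ix ∉ cell_bases ∧ ix ∉ umi_bases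
    · have : pvStepA umi_bases cell_bases discard_bases
          (String.ofList ns, String.ofList nq, String.ofList uq, String.ofList cq, ix) (base, qual)
          = (String.ofList (ns ++ [base]), String.ofList (nq ++ [qual]),
             String.ofList uq, String.ofList cq, ix + 1) := by
        simp [pvStepA, hk, pv_push_eq]
      rw [this, ih]
      simp [PySem.List.enumerate_cons, hk]
      omega
    · by_cases hc : ix ∈ cell_bases
      · have : pvStepA umi_bases cell_bases discard_bases
            (String.ofList ns, String.ofList nq, String.ofList uq, String.ofList cq, ix) (base, qual)
            = (String.ofList ns, String.ofList nq, String.ofList uq,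
               String.ofList (cq ++ [qual]), ix + 1) := by
          simp [pvStepA, hc, pv_push_eq]
        rw [this, ih]
        simp [PySem.List.enumerate_cons, hc]
        omega
      · by_cases hu : ix ∈ umi_bases
        · have : pvStepA umi_bases cell_bases discard_bases
              (String.ofList ns, String.ofList nq, String.ofList uq, String.ofList cq, ix) (base, qual)
              = (String.ofList ns, String.ofList nq,
                 String.ofList (uq ++ [qual]), String.ofList cq, ix + 1) := by
            simp [pvStepA, hc, hu, pv_push_eq]
          rw [this, ih]
          simp [PySem.List.enumerate_cons, hc, hu]
          omega
        · have : pvStepA umi_bases cell_bases discard_bases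
              (String.ofList ns, String.ofList nq, String.ofList uq, String.ofList cq, ix) (base, qual)
              = (String.ofList ns, String.ofList nq, String.ofList uq, String.ofList cq, ix + 1) := by
            have hd : ix ∈ discard_bases := by tauto
            simp [pvStepA, hd, hc, hu]
          rw [this, ih]
          have hd : ix ∈ discard_bases := by tauto
          simp [PySem.List.enumerate_cons, hd, hc, hu]
          omega

-- ===== VERDICT (by name: the statement is the Claim_ definition above) =====
theorem extractSeqAndQuals_spec : Claim_equal_extractSeqAndQuals := by
  intro seq quals umi_bases cell_bases discard_bases _
  unfold Spec_extractSeqAndQuals extractSeqAndQuals extractSeqAndQuals_alt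
  have h := pv_loopA umi_bases cell_bases discard_bases (seq.toList.zip quals.toList)
      [] [] [] [] 0
  simp only [List.nil_append] at h
  simp only [h]
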